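-- pv_equiv track=rewrite | github.com/ZermZhang/StudyRecord | src/LeetCode/gcdOfStrings.py | getMaxSub
-- ===== SOURCE A (Python) =====
-- def getMaxSub(s: str) -> str:
--     sub_len = 1
--
--     while sub_len < len(s):
--         if s[:sub_len] != s[-sub_len:]:
--             sub_len += 1
--             continue
--         else:
--             break
--     return s[:sub_len]
-- ===== SOURCE B (Python) =====
-- def getMaxSub(s: str) -> str:
--     # KMP prefix function: smallest nonzero border found by following the failure chain.
--     n = len(s)
--     if n <= 1:
--         return s
--     pi = [0] * n
--     k = 0
--     for i in range(1, n):
--         while k and s[i] != s[k]: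
--             k = pi[k - 1]
--         if s[i] == s[k]:
--             k += 1
--         pi[i] = k
--     b = pi[n - 1]
--     if b == 0:
--         return s
--     while pi[b - 1]:
--         b = pi[b - 1]
--     return s[:b]
-- ===== Notes on version B (the rewrite author's own statement) =====
-- stated objective: faster
-- what changed: Replaced A's scan that compares a fresh prefix/suffix slice for every candidate length (O(n^2)) by the KMP prefix-function, following the failure chain from the longest border down to the smallest border in linear time.
import Mathlib
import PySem

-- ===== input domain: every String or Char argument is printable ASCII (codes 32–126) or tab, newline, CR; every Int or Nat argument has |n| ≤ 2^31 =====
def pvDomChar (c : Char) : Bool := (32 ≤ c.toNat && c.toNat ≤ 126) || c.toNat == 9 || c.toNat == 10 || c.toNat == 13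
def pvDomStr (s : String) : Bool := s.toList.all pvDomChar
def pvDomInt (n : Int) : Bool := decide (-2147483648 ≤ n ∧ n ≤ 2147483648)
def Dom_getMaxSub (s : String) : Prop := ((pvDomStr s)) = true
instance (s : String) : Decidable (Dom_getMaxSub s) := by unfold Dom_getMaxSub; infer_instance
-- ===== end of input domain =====

-- B replaces A's quadratic scan over all candidate prefix lengths (slice comparison per length)
-- by the linear-time KMP prefix-function, descending the failure chain to the smallest border.

-- ===== PORT A =====
-- A's while loop: sub_len from 1 upward, stop at first sub_len with s[:sub_len] == s[-sub_len:]
def aLoop (l : List Char) (k : Nat) : Nat :=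
  if k < l.length then
    if PySem.List.slice l none (some (k : Int)) ≠ PySem.List.slice l (some (-(k : Int))) none then
      aLoop l (k + 1)
    else k
  else k
termination_by l.length - k

def getMaxSub (s : String) : String :=
  String.ofList (PySem.List.slice s.toList none (some ((aLoop s.toList 1 : Nat) : Int)))

-- ===== PORT B =====
-- inner `while k and s[i] != s[k]: k = pi[k-1]`; fuel k suffices since pi[j-1] < j always holds
def descend (fuel : Nat) (l : List Char) (pi : List Nat) (i k : Nat) : Nat :=
  match fuel with
  | 0 => k
  | fuel + 1 =>
    if k ≠ 0 ∧ l.getD i ' ' ≠ l.getD k ' ' then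
      descend fuel l pi i (pi.getD (k - 1) 0)
    else k

-- one body of the `for i in range(1, n)` loop: the value stored in pi[i]
def kmpStepK (l : List Char) (pi : List Nat) (i k : Nat) : Nat :=
  let k1 := descend k l pi i k
  if l.getD i ' ' = l.getD k1 ' ' then k1 + 1 else k1

def kmpLoop (l : List Char) (i k : Nat) (pi : List Nat) : List Nat :=
  if i < l.length then
    kmpLoop l (i + 1) (kmpStepK l pi i k) (pi ++ [kmpStepK l pi i k])
  else pi
termination_by l.length - i

-- `while pi[b-1]: b = pi[b-1]`; fuel b suffices since pi[b-1] < b always holds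
def chainDown (fuel : Nat) (pi : List Nat) (b : Nat) : Nat :=
  match fuel with
  | 0 => b
  | fuel + 1 =>
    if pi.getD (b - 1) 0 ≠ 0 then chainDown fuel pi (pi.getD (b - 1) 0) else b

def getMaxSub_alt (s : String) : String :=
  let l := s.toList
  let n := l.length
  if n ≤ 1 then s
  else
    let pi := kmpLoop l 1 0 [0]
    let b := pi.getD (n - 1) 0
    if b = 0 then s
    else String.ofList (PySem.List.slice l none (some ((chainDown b pi b : Nat) : Int)))

-- ===== PRECONDITION & SPEC =====
def Spec_getMaxSub (s : String) (out : String) : Prop := out = getMaxSub_alt s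
instance (s : String) (out : String) : Decidable (Spec_getMaxSub s out) := by unfold Spec_getMaxSub; infer_instance

-- ===== CLAIM (what is proved, stated in full; the proofs are below) =====
def Claim_equal_getMaxSub : Prop := ∀ (s : String), Dom_getMaxSub s → Spec_getMaxSub s (getMaxSub s)

-- ===== LEMMAS AND PROOFS =====

-- `Brd l k`: the prefix of length k of l equals its suffix of length k (a border; trivial for k = 0)
def Brd (l : List Char) (k : Nat) : Prop := l.take k = l.drop (l.length - k)

-- largest proper border length of l (0 if none)
def maxB (l : List Char) : Nat :=
  Nat.findGreatest (fun k => l.take k = l.drop (l.length - k)) (l.length - 1)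

theorem brd_zero (l : List Char) : Brd l 0 := by simp [Brd]

theorem getD_take (l : List Char) {j i : Nat} (h : j < i) (d : Char) :
    (l.take i).getD j d = l.getD j d := by
  simp [List.getD, h]

theorem take_succ_getD (l : List Char) {i : Nat} (h : i < l.length) :
    l.take (i + 1) = l.take i ++ [l.getD i ' '] := by
  rw [List.take_add_one, List.getElem?_eq_getElem h, List.getD, List.getElem?_eq_getElem h]
  rfl

theorem length_take_of_le {l : List Char} {k : Nat} (h : k ≤ l.length) :
    (l.take k).length = k := by simp [List.length_take]; omega

theorem brd_nest_down {l : List Char} {j k : Nat} (hjk : j ≤ k) (hk : k ≤ l.length)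
    (hbk : Brd l k) (hbj : Brd l j) : Brd (l.take k) j := by
  unfold Brd at *
  rw [length_take_of_le hk, List.take_take, min_eq_left hjk, hbk, List.drop_drop]
  have : l.length - k + (k - j) = l.length - j := by omega
  rw [this, ← hbj]

theorem brd_nest_up {l : List Char} {j k : Nat} (hjk : j ≤ k) (hk : k ≤ l.length)
    (hbk : Brd l k) (hbj : Brd (l.take k) j) : Brd l j := by
  unfold Brd at *
  rw [length_take_of_le hk, List.take_take, min_eq_left hjk, hbk, List.drop_drop] at hbj
  have : l.length - k + (k - j) = l.length - j := by omega
  rwa [this] at hbj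

theorem append_singleton_inj {a b : List Char} {x y : Char} :
    a ++ [x] = b ++ [y] ↔ a = b ∧ x = y := by
  constructor
  · intro h
    have := List.append_inj' h (by rfl)
    simpa using this
  · rintro ⟨rfl, rfl⟩; rfl

theorem brd_append {l : List Char} {c : Char} {k : Nat} (h : k < l.length) :
    Brd (l ++ [c]) (k + 1) ↔ Brd l k ∧ l.getD k ' ' = c := by
  unfold Brd
  have h1 : (l ++ [c]).take (k + 1) = l.take k ++ [l.getD k ' '] := by
    rw [List.take_append_of_le_length (by omega), take_succ_getD l h]
  have hlen : (l ++ [c]).length = l.length + 1 := by simp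
  have h2 : (l ++ [c]).drop ((l ++ [c]).length - (k + 1)) = l.drop (l.length - k) ++ [c] := by
    rw [hlen]
    have : l.length + 1 - (k + 1) = l.length - k := by omega
    rw [this, List.drop_append_of_le_length (by omega)]
  rw [h1, h2, append_singleton_inj]

theorem maxB_brd (l : List Char) : Brd l (maxB l) := by
  unfold maxB
  exact Nat.findGreatest_spec (m := 0) (Nat.zero_le _) (brd_zero l)

theorem maxB_le (l : List Char) : maxB l ≤ l.length - 1 := Nat.findGreatest_le _

theorem le_maxB {l : List Char} {j : Nat} (hb : j ≤ l.length - 1) (h : Brd l j) :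
    j ≤ maxB l := Nat.le_findGreatest hb h

-- correctness of the failure-chain descent
theorem descend_spec (l : List Char) (pi : List Nat) (i : Nat) (hi : i ≤ l.length)
    (htbl : ∀ j, j < i → pi.getD j 0 = maxB (l.take (j + 1))) :
    ∀ fuel k, k ≤ fuel → k < i → Brd (l.take i) k →
      descend fuel l pi i k ≤ k ∧
      descend fuel l pi i k < i ∧
      Brd (l.take i) (descend fuel l pi i k) ∧
      (descend fuel l pi i k = 0 ∨ l.getD (descend fuel l pi i k) ' ' = l.getD i ' ') ∧
      (∀ j, j ≤ k → Brd (l.take i) j → l.getD j ' ' = l.getD i ' ' → j ≤ descend fuel l pi i k) := by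
  intro fuel
  induction fuel with
  | zero =>
    intro k hk hki hbk
    have hk0 : k = 0 := by omega
    subst hk0
    simp only [descend]
    refine ⟨le_refl _, hki, hbk, Or.inl ?_, fun j hj _ _ => hj⟩
    trivial
  | succ fuel ih =>
    intro k hk hki hbk
    have hti : (l.take i).length = i := length_take_of_le hi
    by_cases hc : k ≠ 0 ∧ l.getD i ' ' ≠ l.getD k ' '
    · have hstep : descend (fuel + 1) l pi i k = descend fuel l pi i (pi.getD (k - 1) 0) := by
        simp only [descend, if_pos hc]
      obtain ⟨hk0, hne⟩ := hc
      have hkm : pi.getD (k - 1) 0 = maxB (l.take k) := by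
        have := htbl (k - 1) (by omega)
        rwa [Nat.sub_add_cancel (by omega)] at this
      set k' := pi.getD (k - 1) 0 with hk'
      have hk'le : k' ≤ k - 1 := by
        rw [hkm]
        have h := maxB_le (l.take k)
        rwa [length_take_of_le (show k ≤ l.length by omega)] at h
      -- Brd (l.take i) k'
      have hbrdk' : Brd (l.take i) k' := by
        have h1 : Brd ((l.take i).take k) k' := by
          have : (l.take i).take k = l.take k := by
            rw [List.take_take, min_eq_left (le_of_lt hki)]
          rw [this, hkm]; exact maxB_brd _
        exact brd_nest_up (by omega) (by omega) hbk h1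
      have hrec := ih k' (by omega) (by omega) hbrdk'
      rw [hstep]
      obtain ⟨hr1, hr2, hr3, hr4, hr5⟩ := hrec
      refine ⟨by omega, hr2, hr3, hr4, ?_⟩
      intro j hj hbj hcj
      -- j ≠ k since l.getD k ≠ l.getD i but l.getD j = l.getD i
      have hjk : j < k := by
        rcases lt_or_eq_of_le hj with h | h
        · exact h
        · exfalso; apply hne; rw [← h, hcj]
      -- j is a border of (l.take i).take k = l.take k, so j ≤ maxB (l.take k) = k'
      have hbj' : Brd ((l.take i).take k) j := brd_nest_down (by omega) (by omega) hbk hbj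
      have : (l.take i).take k = l.take k := by
        rw [List.take_take, min_eq_left (le_of_lt hki)]
      rw [this] at hbj'
      have hjle : j ≤ maxB (l.take k) := by
        apply le_maxB _ hbj'
        simp [List.length_take]; omega
      exact hr5 j (by omega) hbj hcj
    · have hstep : descend (fuel + 1) l pi i k = k := by
        simp only [descend, if_neg hc]
      rw [hstep]
      refine ⟨le_refl _, hki, hbk, ?_, fun j hj _ _ => hj⟩
      push Not at hc
      by_cases hk0 : k = 0
      · exact Or.inl hk0
      · exact Or.inr (hc hk0).symm

-- one KMP step computes the longest proper border of the next prefix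
theorem maxB_step (l : List Char) (pi : List Nat) (i : Nat) (h1 : 1 ≤ i) (hi : i < l.length)
    (htbl : ∀ j, j < i → pi.getD j 0 = maxB (l.take (j + 1))) :
    kmpStepK l pi i (maxB (l.take i)) = maxB (l.take (i + 1)) := by
  set t := l.take i with ht
  have hti : t.length = i := length_take_of_le (le_of_lt hi)
  set c := l.getD i ' ' with hc
  have htc : l.take (i + 1) = t ++ [c] := take_succ_getD l hi
  set k := maxB t with hk
  have hki : k < i := by
    have := maxB_le t
    omega
  have hbk : Brd t k := maxB_brd t
  obtain ⟨hr1, hr2, hr3, hr4, hr5⟩ :=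
    descend_spec l pi i (le_of_lt hi) htbl k k (le_refl k) hki hbk
  set r := descend k l pi i k with hr
  have hgetr : t.getD r ' ' = l.getD r ' ' := getD_take l hr2 ' '
  -- facts about borders of t ++ [c]
  have hmaxdef : maxB (l.take (i + 1)) =
      Nat.findGreatest (fun m => (t ++ [c]).take m = (t ++ [c]).drop ((t ++ [c]).length - m)) i := by
    rw [htc]
    unfold maxB
    congr 1
    simp [hti]
  unfold kmpStepK
  rw [← hr]
  by_cases heq : l.getD i ' ' = l.getD r ' '
  · rw [if_pos heq]
    rw [hmaxdef]
    symm
    rw [Nat.findGreatest_eq_iff]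
    refine ⟨by omega, fun _ => ?_, ?_⟩
    · -- Brd (t ++ [c]) (r + 1)
      show Brd (t ++ [c]) (r + 1)
      rw [brd_append (by omega)]
      refine ⟨hr3, ?_⟩
      rw [hgetr, ← heq]
    · intro m hm hmi hP
      obtain ⟨j, rfl⟩ : ∃ j, m = j + 1 := ⟨m - 1, by omega⟩
      have hbj : Brd t j ∧ t.getD j ' ' = c := by
        rw [← brd_append (by omega)]
        exact hP
      have hjk : j ≤ k := le_maxB (by omega) hbj.1
      have hcj : l.getD j ' ' = l.getD i ' ' := by
        rw [← getD_take l (show j < i by omega) ' ', hbj.2]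
      have : j ≤ r := hr5 j hjk hbj.1 hcj
      omega
  · rw [if_neg heq]
    have hr0 : r = 0 := by
      rcases hr4 with h | h
      · exact h
      · exact absurd h.symm heq
    rw [hr0, hmaxdef]
    symm
    rw [Nat.findGreatest_eq_zero_iff]
    intro m hm hmi hP
    obtain ⟨j, rfl⟩ : ∃ j, m = j + 1 := ⟨m - 1, by omega⟩
    have hbj : Brd t j ∧ t.getD j ' ' = c := by
      rw [← brd_append (by omega)]
      exact hP
    have hjk : j ≤ k := le_maxB (by omega) hbj.1
    have hcj : l.getD j ' ' = l.getD i ' ' := by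
      rw [← getD_take l (show j < i by omega) ' ', hbj.2]
    have hjr : j ≤ r := hr5 j hjk hbj.1 hcj
    have hj0 : j = 0 := by omega
    apply heq
    rw [hr0, ← hj0]
    exact hcj.symm

-- the finished table holds the longest proper border of every prefix
theorem kmpLoop_spec (l : List Char) :
    ∀ d i k pi, l.length - i = d → 1 ≤ i → i ≤ l.length → pi.length = i →
      (∀ j, j < i → pi.getD j 0 = maxB (l.take (j + 1))) → k = maxB (l.take i) →
      ∀ j, j < l.length → (kmpLoop l i k pi).getD j 0 = maxB (l.take (j + 1)) := by
  intro d
  induction d with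
  | zero =>
    intro i k pi hd h1 hle hlen htbl hk j hj
    have hin : i = l.length := by omega
    rw [kmpLoop, if_neg (by omega)]
    exact htbl j (by omega)
  | succ d ih =>
    intro i k pi hd h1 hle hlen htbl hk j hj
    have hlt : i < l.length := by omega
    rw [kmpLoop, if_pos hlt]
    have hstep : kmpStepK l pi i k = maxB (l.take (i + 1)) := by
      rw [hk]; exact maxB_step l pi i h1 hlt htbl
    apply ih (i + 1) _ _ (by omega) (by omega) (by omega) (by simp [hlen])
      _ hstep j hj
    intro j' hj'
    by_cases hji : j' < i
    · rw [List.getD, List.getElem?_append_left (by omega), ← List.getD]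
      exact htbl j' hji
    · have hj'i : j' = i := by omega
      subst hj'i
      rw [List.getD, List.getElem?_append_right (by omega), hlen]
      simp [hstep]

-- the chain descent reaches a positive border whose own prefix has no positive border
theorem chainDown_spec (l : List Char) (pi : List Nat)
    (htbl : ∀ j, j < l.length → pi.getD j 0 = maxB (l.take (j + 1))) :
    ∀ fuel b, b ≤ fuel → 0 < b → b < l.length → Brd l b →
      0 < chainDown fuel pi b ∧ chainDown fuel pi b ≤ b ∧ chainDown fuel pi b < l.length ∧
      Brd l (chainDown fuel pi b) ∧ maxB (l.take (chainDown fuel pi b)) = 0 := by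
  intro fuel
  induction fuel with
  | zero => intro b hb h0 _ _; omega
  | succ fuel ih =>
    intro b hb h0 hbn hbrd
    have hbm : pi.getD (b - 1) 0 = maxB (l.take b) := by
      have := htbl (b - 1) (by omega)
      rwa [Nat.sub_add_cancel (by omega)] at this
    by_cases hc : pi.getD (b - 1) 0 ≠ 0
    · have hstep : chainDown (fuel + 1) pi b = chainDown fuel pi (pi.getD (b - 1) 0) := by
        simp only [chainDown, if_pos hc]
      set b' := pi.getD (b - 1) 0 with hb'
      have hb'le : b' ≤ b - 1 := by
        rw [hbm]
        have h := maxB_le (l.take b)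
        rwa [length_take_of_le (show b ≤ l.length by omega)] at h
      have hb'brd : Brd l b' := by
        apply brd_nest_up (k := b) (by omega) (by omega) hbrd
        rw [hbm]; exact maxB_brd _
      have := ih b' (by omega) (by omega) (by omega) hb'brd
      rw [hstep]
      exact ⟨this.1, by omega, this.2.2⟩
    · have hstep : chainDown (fuel + 1) pi b = b := by
        simp only [chainDown, if_neg hc]
      push Not at hc
      rw [hstep]
      exact ⟨h0, le_refl _, hbn, hbrd, by rw [← hbm]; exact hc⟩

-- a positive border whose prefix has no positive border is the least positive border
theorem least_border {l : List Char} {r : Nat} (hrn : r ≤ l.length)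
    (hbrd : Brd l r) (hmax : maxB (l.take r) = 0) :
    ∀ j, 0 < j → j < r → ¬ Brd l j := by
  intro j hj0 hjr hbj
  have h1 : Brd (l.take r) j := brd_nest_down (by omega) hrn hbrd hbj
  have h2 : j ≤ maxB (l.take r) := by
    apply le_maxB _ h1
    simp [List.length_take]; omega
  omega

-- A's scan condition, rewritten
theorem aLoop_cond (l : List Char) {k : Nat} (hk : 0 < k) :
    (PySem.List.slice l none (some (k : Int)) ≠ PySem.List.slice l (some (-(k : Int))) none)
      ↔ ¬ Brd l k := by
  rw [PySem.List.slice_to_natCast, PySem.List.slice_from_neg_natCast l k hk]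
  unfold Brd
  tauto

-- A's loop stops at the first k with a border; characterisations
theorem aLoop_find (l : List Char) :
    ∀ d k r, r - k = d → 0 < k → k ≤ r → r < l.length → Brd l r →
      (∀ j, k ≤ j → j < r → ¬ Brd l j) → aLoop l k = r := by
  intro d
  induction d with
  | zero =>
    intro k r hd h0 hkr hrn hbrd _
    have : k = r := by omega
    subst this
    rw [aLoop, if_pos hrn, if_neg]
    rw [aLoop_cond l h0]
    tauto
  | succ d ih =>
    intro k r hd h0 hkr hrn hbrd hnone
    have hkr' : k < r := by omega
    have hnb : ¬ Brd l k := hnone k (le_refl _) hkr'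
    rw [aLoop, if_pos (by omega), if_pos (by rw [aLoop_cond l h0]; exact hnb)]
    exact ih (k + 1) r (by omega) (by omega) (by omega) hrn hbrd
      (fun j hj hjr => hnone j (by omega) hjr)

theorem aLoop_exhaust (l : List Char) :
    ∀ d k, l.length - k = d → 0 < k → k ≤ l.length →
      (∀ j, k ≤ j → j < l.length → ¬ Brd l j) → aLoop l k = l.length := by
  intro d
  induction d with
  | zero =>
    intro k hd h0 hk _
    rw [aLoop, if_neg (by omega)]
    omega
  | succ d ih =>
    intro k hd h0 hk hnone
    have hkn : k < l.length := by omega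
    rw [aLoop, if_pos hkn, if_pos (by rw [aLoop_cond l h0]; exact hnone k (le_refl _) hkn)]
    exact ih (k + 1) (by omega) (by omega) (by omega) (fun j hj hjn => hnone j (by omega) hjn)

-- ===== VERDICT (by name: the statement is the Claim_ definition above) =====
theorem getMaxSub_spec : Claim_equal_getMaxSub := by
  intro s _
  unfold Spec_getMaxSub getMaxSub getMaxSub_alt
  set l := s.toList with hl
  set n := l.length with hn
  rw [PySem.List.slice_to_natCast]
  by_cases hsmall : n ≤ 1
  · rw [if_pos hsmall]
    have h1 : aLoop l 1 = 1 := by rw [aLoop, if_neg (by omega)]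
    rw [h1, List.take_of_length_le (by omega)]
    simp [hl]
  · rw [if_neg hsmall]
    have hn1 : 1 ≤ n := by omega
    -- full prefix-function table
    have htbl : ∀ j, j < n → (kmpLoop l 1 0 [0]).getD j 0 = maxB (l.take (j + 1)) := by
      apply kmpLoop_spec l (n - 1) 1 0 [0] (by omega) (le_refl _) (by omega) rfl
      · intro j hj
        have : j = 0 := by omega
        subst this
        simp [maxB, List.length_take]
      · simp [maxB, List.length_take]
    set pi := kmpLoop l 1 0 [0] with hpi
    have htn : l.take n = l := by rw [hn]; exact List.take_length
    have hb : pi.getD (n - 1) 0 = maxB l := by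
      have := htbl (n - 1) (by omega)
      rwa [Nat.sub_add_cancel (by omega), htn] at this
    by_cases hb0 : pi.getD (n - 1) 0 = 0
    · rw [if_pos hb0]
      have hnone : ∀ j, 1 ≤ j → j < n → ¬ Brd l j := by
        intro j hj1 hjn hbj
        have : j ≤ maxB l := le_maxB (by omega) hbj
        rw [← hb] at this
        omega
      have : aLoop l 1 = n := aLoop_exhaust l (n - 1) 1 (by omega) (by omega) (by omega) hnone
      rw [this, htn]
      simp [hl]
    · rw [if_neg hb0]
      rw [PySem.List.slice_to_natCast]
      have hbpos : 0 < pi.getD (n - 1) 0 := by omega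
      have hbn : pi.getD (n - 1) 0 < n := by
        rw [hb]
        have := maxB_le l
        omega
      have hbbrd : Brd l (pi.getD (n - 1) 0) := by rw [hb]; exact maxB_brd l
      obtain ⟨hc1, hc2, hc3, hc4, hc5⟩ :=
        chainDown_spec l pi htbl (pi.getD (n - 1) 0) (pi.getD (n - 1) 0)
          (le_refl _) hbpos hbn hbbrd
      set r := chainDown (pi.getD (n - 1) 0) pi (pi.getD (n - 1) 0) with hr
      have : aLoop l 1 = r :=
        aLoop_find l (r - 1) 1 r (by omega) (by omega) (by omega) hc3 hc4
          (fun j hj hjr => least_border (by omega) hc4 hc5 j (by omega) hjr)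
      rw [this]
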